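-- pv_equiv track=rewrite | github.com/MaxRonce/foundation-models-benchmark | src/fmb/detection/select_nf_outliers_astropt.py | intersect_ids
-- ===== SOURCE A (Python) =====
-- def intersect_ids(selected: dict[str, dict[str, dict[str, float]]]) -> set[str]:
--     sets = [set(per_key.keys()) for per_key in selected.values() if per_key]
--     if not sets:
--         return set()
--     common = sets[0]
--     for s in sets[1:]:
--         common = common & s
--     return common
-- ===== SOURCE B (Python) =====
-- def intersect_ids(selected: dict[str, dict[str, dict[str, float]]]) -> set[str]:
--     counts = {}
--     n = 0
--     for per_key in selected.values():
--         if per_key: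
--             n += 1
--             for k in per_key:
--                 counts[k] = counts.get(k, 0) + 1
--     return {k for k, c in counts.items() if c == n}
-- ===== Notes on version B (the rewrite author's own statement) =====
-- stated objective: alternative
-- what changed: Replaces A's repeated pairwise set intersections with a single pass that builds a global key-frequency dict plus a count n of non-empty inner dicts, then keeps the keys whose tally equals n.
import Mathlib
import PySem

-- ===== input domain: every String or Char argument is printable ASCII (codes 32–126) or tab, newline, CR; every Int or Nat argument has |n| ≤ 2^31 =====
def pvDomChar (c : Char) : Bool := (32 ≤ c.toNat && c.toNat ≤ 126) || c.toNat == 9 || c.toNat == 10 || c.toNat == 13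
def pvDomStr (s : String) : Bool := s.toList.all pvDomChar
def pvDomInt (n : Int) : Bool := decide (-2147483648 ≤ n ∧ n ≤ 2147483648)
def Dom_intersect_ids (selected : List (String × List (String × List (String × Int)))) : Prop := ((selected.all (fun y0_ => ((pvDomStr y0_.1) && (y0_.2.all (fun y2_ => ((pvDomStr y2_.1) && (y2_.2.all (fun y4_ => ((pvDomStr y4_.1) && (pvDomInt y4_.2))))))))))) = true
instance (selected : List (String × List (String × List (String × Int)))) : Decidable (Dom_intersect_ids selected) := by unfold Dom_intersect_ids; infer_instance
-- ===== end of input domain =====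

-- B replaces A's repeated set intersections by one global key-frequency table (a dict built in a
-- single pass over all non-empty inner dicts) followed by one filtering pass; same return value.

-- ===== PORT A =====
-- sets = [set(per_key.keys()) for per_key in selected.values() if per_key]; then left-fold of '&'.
def intersect_ids (selected : List (String × List (String × List (String × Int)))) : List String :=
  let sets : List (PySem.Set String) :=
    ((PySem.Dict.ofList selected).values.filter (fun per_key => !per_key.isEmpty)).map
      (fun per_key => PySem.Set.ofList ((PySem.Dict.ofList per_key).keys))
  match sets with
  | [] => ([] : PySem.Set String)
  | common :: rest => rest.foldl (fun common s => PySem.Set.inter common s) common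

-- ===== PORT B =====
-- one pass: count every key of every non-empty inner dict and the number n of such dicts,
-- then keep the keys whose tally equals n.
def intersect_ids_alt (selected : List (String × List (String × List (String × Int)))) : List String :=
  let st : PySem.Dict String Int × Int :=
    (PySem.Dict.ofList selected).values.foldl
      (fun st per_key =>
        if per_key.isEmpty then st
        else (((PySem.Dict.ofList per_key).keys).foldl
                (fun counts k => counts.insert k (counts.getD k 0 + 1)) st.1,
              st.2 + 1))
      (PySem.Dict.empty, 0)
  (st.1.items.filter (fun kv => kv.2 == st.2)).map (fun kv => kv.1)

-- ===== PRECONDITION & SPEC =====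
def Spec_intersect_ids (selected : List (String × List (String × List (String × Int)))) (out : List String) : Prop := out = intersect_ids_alt selected
instance (selected : List (String × List (String × List (String × Int)))) (out : List String) : Decidable (Spec_intersect_ids selected out) := by unfold Spec_intersect_ids; infer_instance

-- ===== CLAIM (what is proved, stated in full; the proofs are below) =====
def Claim_equal_intersect_ids : Prop := ∀ (selected : List (String × List (String × List (String × Int)))), Dom_intersect_ids selected → Spec_intersect_ids selected (intersect_ids selected)

-- ===== LEMMAS AND PROOFS =====

-- B's paired fold = (counting fold over all keys of the kept dicts, number of kept dicts)
theorem pvB_fold_char {ν : Type} (vs : List (List (String × ν))) (d : PySem.Dict String Int) (n : Int) :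
    vs.foldl
      (fun st per_key =>
        if per_key.isEmpty then st
        else (((PySem.Dict.ofList per_key).keys).foldl
                (fun counts k => counts.insert k (counts.getD k 0 + 1)) st.1,
              st.2 + 1))
      (d, n)
    = ((((vs.filter (fun pk => !pk.isEmpty)).map
          (fun pk => (PySem.Dict.ofList pk).keys)).flatten).foldl
          (fun counts k => counts.insert k (counts.getD k 0 + 1)) d,
       n + ((vs.filter (fun pk => !pk.isEmpty)).length : Int)) := by
  induction vs generalizing d n with
  | nil => simp
  | cons pk vs ih =>
    by_cases hpk : pk.isEmpty
    · rw [List.isEmpty_iff] at hpk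
      subst hpk
      simpa using ih d n
    · rw [List.foldl_cons, if_neg (by simpa using hpk), ih]
      have hf : List.filter (fun pk => !pk.isEmpty) (pk :: vs)
          = pk :: List.filter (fun pk => !pk.isEmpty) vs := by
        simp [hpk]
      rw [hf]
      simp only [List.map_cons, List.flatten_cons, List.foldl_append, List.length_cons,
        Prod.mk.injEq]
      exact ⟨trivial, by push_cast; ring⟩


-- A's intersection fold is one filter by membership in every later set
theorem pvA_fold_char (rest : List (List String)) (s : List String) :
    rest.foldl (fun common t => PySem.Set.inter common t) s
    = s.filter (fun x => rest.all (fun t => t.contains x)) := by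
  induction rest generalizing s with
  | nil => simp
  | cons t rest ih =>
    rw [List.foldl_cons, ih]
    show (PySem.Set.inter s t).filter _ = _
    rw [PySem.Set.inter, List.filter_filter]
    apply List.filter_congr
    intro x _
    simp [Bool.and_comm]


-- sum of counts over nodup lists: ≤ length, with equality iff member of each
theorem pvCount_sum_le (rest : List (List String)) (x : String)
    (h : ∀ t ∈ rest, t.Nodup) : (rest.map (List.count x)).sum ≤ rest.length := by
  induction rest with
  | nil => simp
  | cons t rest ih =>
    have h1 : List.count x t ≤ 1 := List.nodup_iff_count_le_one.mp (h t (by simp)) x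
    have := ih (fun u hu => h u (by simp [hu]))
    simp only [List.map_cons, List.sum_cons, List.length_cons]
    omega


theorem pvCount_sum_eq_iff (rest : List (List String)) (x : String)
    (h : ∀ t ∈ rest, t.Nodup) :
    (rest.map (List.count x)).sum = rest.length ↔ ∀ t ∈ rest, x ∈ t := by
  induction rest with
  | nil => simp
  | cons t rest ih =>
    have h1 : List.count x t ≤ 1 := List.nodup_iff_count_le_one.mp (h t (by simp)) x
    have hle := pvCount_sum_le rest x (fun u hu => h u (by simp [hu]))
    have hih := ih (fun u hu => h u (by simp [hu]))
    simp only [List.map_cons, List.sum_cons, List.length_cons, List.mem_cons]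
    constructor
    · intro he
      have ht : List.count x t = 1 := by omega
      have hr : (rest.map (List.count x)).sum = rest.length := by omega
      have hx : x ∈ t := List.count_pos_iff.mp (by omega)
      intro u hu
      rcases hu with rfl | hu
      · exact hx
      · exact hih.mp hr u hu
    · intro hall
      have hx : x ∈ t := hall t (Or.inl rfl)
      have ht : 1 ≤ List.count x t := List.count_pos_iff.mpr hx
      have hr : (rest.map (List.count x)).sum = rest.length :=
        hih.mpr (fun u hu => hall u (Or.inr hu))
      omega


-- set(a ++ b) is set(a) followed by elements not in set(a)
theorem pvOfList_append_split (a b : List String) :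
    ∃ t, PySem.Set.ofList (a ++ b) = PySem.Set.ofList a ++ t ∧
      ∀ x ∈ t, x ∉ PySem.Set.ofList a := by
  rw [PySem.Set.ofList_eq_foldl, List.foldl_append, ← PySem.Set.ofList_eq_foldl]
  generalize PySem.Set.ofList a = s
  induction b generalizing s with
  | nil => exact ⟨[], by simp⟩
  | cons y b ih =>
    rw [List.foldl_cons]
    by_cases hy : s.contains y
    · rw [PySem.Set.add, if_pos hy]
      exact ih s
    · rw [PySem.Set.add, if_neg hy]
      obtain ⟨t, ht, hnt⟩ := ih (s ++ [y])
      refine ⟨y :: t, by simpa using ht, ?_⟩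
      intro x hx hxs
      rcases hx with _ | hx
      · exact hy (by simpa using List.elem_iff.mpr hxs)
      · exact hnt x (by assumption) (by simp [hxs])


-- ===== VERDICT (by name: the statement is the Claim_ definition above) =====
theorem intersect_ids_spec : Claim_equal_intersect_ids := by
  intro selected _
  unfold Spec_intersect_ids
  simp only [intersect_ids, intersect_ids_alt]
  rw [pvB_fold_char ((PySem.Dict.ofList selected).values) PySem.Dict.empty 0]
  rw [PySem.Dict.foldl_insert_getD_add_one_eq_counter, PySem.Dict.items_counter]
  rw [List.filter_map, List.map_map]
  set nef := (PySem.Dict.ofList selected).values.filter (fun pk => !pk.isEmpty)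
  cases nef with
  | nil => simp
  | cons pk nef' =>
    have hk0 : PySem.Set.ofList ((PySem.Dict.ofList pk).keys) = (PySem.Dict.ofList pk).keys :=
      PySem.Set.ofList_eq_self_of_nodup _ (PySem.Dict.nodup_keys_ofList pk)
    have hrest : nef'.map (fun per_key => PySem.Set.ofList ((PySem.Dict.ofList per_key).keys))
        = nef'.map (fun per_key => (PySem.Dict.ofList per_key).keys) :=
      List.map_congr_left (fun u _ =>
        PySem.Set.ofList_eq_self_of_nodup _ (PySem.Dict.nodup_keys_ofList u))
    simp only [List.map_cons, List.flatten_cons, List.length_cons, hk0, hrest]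
    rw [pvA_fold_char]
    simp only [Function.comp_def, List.map_id']
    have hk0nd : ((PySem.Dict.ofList pk).keys).Nodup := PySem.Dict.nodup_keys_ofList pk
    obtain ⟨t, hsplit, hnotin⟩ := pvOfList_append_split ((PySem.Dict.ofList pk).keys)
      ((nef'.map (fun per_key => (PySem.Dict.ofList per_key).keys)).flatten)
    rw [hk0] at hsplit hnotin
    rw [hsplit, List.filter_append]
    have hkrestnd : ∀ u ∈ nef'.map (fun per_key => (PySem.Dict.ofList per_key).keys), u.Nodup := by
      intro u hu
      obtain ⟨v, _, rfl⟩ := List.mem_map.mp hu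
      exact PySem.Dict.nodup_keys_ofList v
    have ht : List.filter
        (fun x =>
          (↑(List.count x
                ((PySem.Dict.ofList pk).keys ++
                  (List.map (fun per_key => (PySem.Dict.ofList per_key).keys) nef').flatten)) : Int) ==
            0 + ↑(nef'.length + 1)) t = [] := by
      apply List.filter_eq_nil_iff.mpr
      intro x hx
      have h0 : List.count x ((PySem.Dict.ofList pk).keys) = 0 :=
        List.count_eq_zero.mpr (hnotin x hx)
      have hle := pvCount_sum_le (nef'.map (fun per_key => (PySem.Dict.ofList per_key).keys)) x hkrestnd
      simp only [List.count_append, List.count_flatten, h0, List.length_map, beq_iff_eq] at *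
      intro hcontra
      omega
    rw [ht, List.append_nil]
    apply List.filter_congr
    intro x hx
    have h1 : List.count x ((PySem.Dict.ofList pk).keys) = 1 := by
      have ha := List.nodup_iff_count_le_one.mp hk0nd x
      have hb := List.count_pos_iff.mpr hx
      omega
    have hiff := pvCount_sum_eq_iff (nef'.map (fun per_key => (PySem.Dict.ofList per_key).keys)) x hkrestnd
    rw [Bool.eq_iff_iff]
    simp only [List.count_append, List.count_flatten, h1, List.all_eq_true, beq_iff_eq,
      List.length_map, List.contains_iff_mem] at *
    constructor
    · intro hall
      have := hiff.mpr hall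
      omega
    · intro hc
      exact hiff.mp (by omega)
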